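-- pv_equiv track=rewrite | github.com/ahamilton/eris | vigil/gut.py | indentation_of_line
-- ===== SOURCE A (Python) =====
-- TAB_SIZE = 4
--
-- def indentation_of_line(line):
--     indentation = 0
--     for character in line:
--         if character == " ":
--             indentation += 1
--         elif character == "\t":
--             indentation += TAB_SIZE
--         elif character == "\n":
--             return None
--         else:  # Is a non-whitespace character.
--             return indentation
-- ===== SOURCE B (Python) =====
-- TAB_SIZE = 4
--
-- def indentation_of_line(line):
--     stripped = line.lstrip(" \t")
--     if not stripped or stripped[0] == "\n":
--         return None
--     leading = line[:len(line) - len(stripped)]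
--     return leading.count(" ") + leading.count("\t") * TAB_SIZE
-- ===== Notes on version B (the rewrite author's own statement) =====
-- stated objective: idiomatic
-- what changed: Replaced A's single interleaved character loop (counting while deciding when to stop) with a boundary-find via lstrip of spaces and tabs followed by a separate counting pass over the leading prefix.
import Mathlib
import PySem

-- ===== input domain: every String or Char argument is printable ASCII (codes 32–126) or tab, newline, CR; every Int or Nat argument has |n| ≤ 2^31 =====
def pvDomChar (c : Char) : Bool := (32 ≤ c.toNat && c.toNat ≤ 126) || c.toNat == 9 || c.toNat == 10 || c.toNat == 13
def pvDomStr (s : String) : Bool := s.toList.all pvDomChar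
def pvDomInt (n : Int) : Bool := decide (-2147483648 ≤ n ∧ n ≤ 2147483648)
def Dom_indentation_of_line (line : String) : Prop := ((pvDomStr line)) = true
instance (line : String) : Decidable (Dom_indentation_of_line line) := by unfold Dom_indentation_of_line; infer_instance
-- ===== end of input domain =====

-- B restructures A's single interleaved scan into an lstrip boundary-find plus a separate counting pass over the leading prefix (idiomatic; same O(n) cost).


-- ===== PORT A =====
-- A's for-loop over the characters with accumulator `indentation`; falling off the end returns None.
def indentGoA : List Char → Int → Option Int
  | [], _ => none
  | c :: rest, ind =>
      if c = ' ' then indentGoA rest (ind + 1)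
      else if c = '\t' then indentGoA rest (ind + 4)
      else if c = '\n' then none
      else some ind

def indentation_of_line (line : String) : Option Int := indentGoA line.toList 0

-- ===== PORT B =====
-- line.lstrip(" \t") is exactly dropWhile (c = ' ' ∨ c = '\t') (no PySem lstrip-with-chars exists);
-- line[:len(line)-len(stripped)] is take of that length; str.count of a single character is List.count. All exact.
def indentation_of_line_alt (line : String) : Option Int :=
  let cs := line.toList
  let stripped := cs.dropWhile (fun c => c = ' ' ∨ c = '\t')
  match stripped with
  | [] => none
  | c :: _ =>
      if c = '\n' then none
      else
        let leading := cs.take (cs.length - stripped.length)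
        some ((leading.count ' ' : Int) + (leading.count '\t') * 4)

-- ===== PRECONDITION & SPEC =====
def Spec_indentation_of_line (line : String) (out : Option Int) : Prop := out = indentation_of_line_alt line
instance (line : String) (out : Option Int) : Decidable (Spec_indentation_of_line line out) := by unfold Spec_indentation_of_line; infer_instance

-- ===== CLAIM (what is proved, stated in full; the proofs are below) =====
def Claim_equal_indentation_of_line : Prop := ∀ (line : String), Dom_indentation_of_line line → Spec_indentation_of_line line (indentation_of_line line)

-- ===== LEMMAS AND PROOFS =====

-- B's slice line[:len-len(stripped)] is the takeWhile prefix.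
lemma take_sub_dropWhile (p : Char → Prop) [DecidablePred p] (cs : List Char) :
    cs.take (cs.length - (cs.dropWhile (fun c => decide (p c))).length) =
      cs.takeWhile (fun c => decide (p c)) := by
  set tw := cs.takeWhile (fun c => decide (p c)) with htw
  set dw := cs.dropWhile (fun c => decide (p c)) with hdw
  have h : cs = tw ++ dw := (List.takeWhile_append_dropWhile).symm
  rw [h, List.length_append, Nat.add_sub_cancel, List.take_left]

-- A's interleaved loop, characterised by the boundary split B computes.
lemma indentGoA_eq (cs : List Char) (ind : Int) :
    indentGoA cs ind =
      match cs.dropWhile (fun c => decide (c = ' ' ∨ c = '\t')) with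
      | [] => none
      | c :: _ =>
          if c = '\n' then none
          else
            some (ind + ((cs.takeWhile (fun c => decide (c = ' ' ∨ c = '\t'))).count ' ' : Int)
                      + ((cs.takeWhile (fun c => decide (c = ' ' ∨ c = '\t'))).count '\t') * 4) := by
  induction cs generalizing ind with
  | nil => simp [indentGoA]
  | cons c rest ih =>
    by_cases hs : c = ' '
    · subst hs
      rw [indentGoA, if_pos rfl, ih]
      simp only [List.dropWhile_cons, List.takeWhile_cons, decide_eq_true_eq, true_or,
        List.count_cons, if_pos]
      cases rest.dropWhile (fun c => decide (c = ' ' ∨ c = '\t')) with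
      | nil => rfl
      | cons d _ =>
        by_cases hd : d = '\n'
        · simp [hd]
        · simp [hd]; ring
    · by_cases ht : c = '\t'
      · subst ht
        rw [indentGoA, if_neg (by decide), if_pos rfl, ih]
        simp only [List.dropWhile_cons, List.takeWhile_cons, decide_eq_true_eq, or_true,
          List.count_cons, if_pos]
        cases rest.dropWhile (fun c => decide (c = ' ' ∨ c = '\t')) with
        | nil => rfl
        | cons d _ =>
          by_cases hd : d = '\n'
          · simp [hd]
          · simp [hd]; ring
      · have hp : ¬ (c = ' ' ∨ c = '\t') := by tauto
        rw [indentGoA, if_neg hs, if_neg ht]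
        simp only [List.dropWhile_cons, List.takeWhile_cons, decide_eq_true_eq]
        rw [if_neg hp, if_neg hp]
        by_cases hn : c = '\n' <;> simp [hn]

-- ===== VERDICT (by name: the statement is the Claim_ definition above) =====
theorem indentation_of_line_spec : Claim_equal_indentation_of_line := by
  intro line _
  unfold Spec_indentation_of_line indentation_of_line indentation_of_line_alt
  rw [indentGoA_eq]
  have ht := take_sub_dropWhile (fun c => c = ' ' ∨ c = '\t') line.toList
  simp only [Bool.decide_or] at ht ⊢
  cases h : line.toList.dropWhile (fun c => decide (c = ' ') || decide (c = '\t')) with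
  | nil => simp
  | cons d tl =>
    rw [h] at ht
    simp only [List.length_cons, String.length_toList] at ht ⊢
    by_cases hd : d = '\n' <;> simp [hd, ht]
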